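-- pv_equiv track=rewrite | github.com/makitaalis/colab | backend/app/main.py | _build_incident_totals
-- ===== SOURCE A (Python) =====
-- from typing import Annotated, Any
--
-- def _build_incident_totals(incidents: list[dict[str, Any]]) -> dict[str, int]:
--     totals: dict[str, int] = {
--         "total": len(incidents),
--         "open": 0,
--         "acked": 0,
--         "silenced": 0,
--         "resolved": 0,
--         "good": 0,
--         "warn": 0,
--         "bad": 0,
--         "sla_breached": 0,
--     }
--     for item in incidents:
--         status_value = str(item.get("status") or "").strip().lower()
--         severity_value = str(item.get("severity") or "").strip().lower()
--         if status_value in totals: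
--             totals[status_value] += 1
--         if severity_value in {"good", "warn", "bad"}:
--             totals[severity_value] += 1
--         if bool(item.get("sla_breached")):
--             totals["sla_breached"] += 1
--     return totals
-- ===== SOURCE B (Python) =====
-- def _build_incident_totals(incidents):
--     def norm(v):
--         return str(v or "").strip().lower()
--     statuses = [norm(item.get("status")) for item in incidents]
--     severities = [norm(item.get("severity")) for item in incidents]
--     return {
--         "total": len(incidents),
--         "open": statuses.count("open"),
--         "acked": statuses.count("acked"),
--         "silenced": statuses.count("silenced"),
--         "resolved": statuses.count("resolved"),
--         "good": severities.count("good"),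
--         "warn": severities.count("warn"),
--         "bad": severities.count("bad"),
--         "sla_breached": sum(1 for item in incidents if item.get("sla_breached")),
--     }
-- ===== Notes on version B (the rewrite author's own statement) =====
-- stated objective: idiomatic
-- what changed: Replaces A's per-item branching that mutates a totals dict with two normalization passes and a dict literal assembled from per-key list counts; Pre_ excludes inputs where some item's normalized status collides with a summary key (total/good/warn/bad/sla_breached), an unspecified corner where A's 'status in totals' membership test counts the item under that colliding key while B counts it nowhere.
import Mathlib
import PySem

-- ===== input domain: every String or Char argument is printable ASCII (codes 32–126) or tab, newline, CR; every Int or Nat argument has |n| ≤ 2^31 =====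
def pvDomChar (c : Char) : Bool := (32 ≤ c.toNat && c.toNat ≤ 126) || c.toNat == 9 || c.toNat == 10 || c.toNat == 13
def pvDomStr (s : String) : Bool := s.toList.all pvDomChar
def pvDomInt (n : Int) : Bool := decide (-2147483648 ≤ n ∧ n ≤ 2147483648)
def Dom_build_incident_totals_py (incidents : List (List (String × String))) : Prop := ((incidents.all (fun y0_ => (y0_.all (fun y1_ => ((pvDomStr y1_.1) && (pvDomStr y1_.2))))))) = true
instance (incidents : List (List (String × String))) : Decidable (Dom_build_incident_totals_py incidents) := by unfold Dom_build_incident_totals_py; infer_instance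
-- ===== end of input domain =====

-- B normalizes statuses/severities in two passes and assembles the totals dict from per-key list
-- counts (objective: idiomatic). Pre_ excludes the unspecified corner stated above its definition.

-- shared with both Pythons: str(item.get(k) or '').strip().lower() and bool(item.get('sla_breached'))
def pvNorm (item : List (String × String)) (k : String) : String :=
  PySem.Str.lower (PySem.Str.strip (((PySem.Dict.mk item).get? k).getD ""))

def pvTruthy (item : List (String × String)) : Bool :=
  ((PySem.Dict.mk item).get? "sla_breached").getD "" ≠ ""

-- ===== PORT A =====
def pvStepA (d : PySem.Dict String Int) (item : List (String × String)) : PySem.Dict String Int :=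
  let sv := pvNorm item "status"
  let xv := pvNorm item "severity"
  let d1 := if d.contains sv then d.modify sv 0 (· + 1) else d
  let d2 := if xv = "good" ∨ xv = "warn" ∨ xv = "bad" then d1.modify xv 0 (· + 1) else d1
  if pvTruthy item then d2.modify "sla_breached" 0 (· + 1) else d2

def build_incident_totals_py (incidents : List (List (String × String))) : List (String × Int) :=
  (incidents.foldl pvStepA
    (PySem.Dict.ofList [("total", PySem.List.len incidents), ("open", 0), ("acked", 0),
      ("silenced", 0), ("resolved", 0), ("good", 0), ("warn", 0), ("bad", 0),
      ("sla_breached", 0)])).items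

-- ===== PORT B =====
def build_incident_totals_py_alt (incidents : List (List (String × String))) : List (String × Int) :=
  let statuses := incidents.map (fun it => pvNorm it "status")
  let severities := incidents.map (fun it => pvNorm it "severity")
  [("total", PySem.List.len incidents),
   ("open", (statuses.count "open" : Int)),
   ("acked", (statuses.count "acked" : Int)),
   ("silenced", (statuses.count "silenced" : Int)),
   ("resolved", (statuses.count "resolved" : Int)),
   ("good", (severities.count "good" : Int)),
   ("warn", (severities.count "warn" : Int)),
   ("bad", (severities.count "bad" : Int)),
   ("sla_breached", (incidents.countP pvTruthy : Int))]

-- ===== PRECONDITION & SPEC =====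
def pvQuirkStatus (it : List (String × String)) : Bool :=
  let s := pvNorm it "status"
  s == "total" || s == "good" || s == "warn" || s == "bad" || s == "sla_breached"

-- Pre_ excludes inputs in which some item's normalized status collides with one of the summary
-- keys 'total', 'good', 'warn', 'bad' or 'sla_breached': statuses outside the open/acked/
-- silenced/resolved vocabulary are an unspecified corner, and A (count the item under the
-- colliding summary key, via its 'status in totals' membership test) and B (count it nowhere)
-- make different defensible choices there.
def Pre_build_incident_totals_py (incidents : List (List (String × String))) : Prop :=
  incidents.any pvQuirkStatus = false
instance (incidents : List (List (String × String))) : Decidable (Pre_build_incident_totals_py incidents) := by unfold Pre_build_incident_totals_py; infer_instance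

def pvWitness_build_incident_totals_py : (List (List (String × String))) :=
  [[("status", "open"), ("severity", "good"), ("sla_breached", "1")], [("status", "Resolved ")]]

def Spec_build_incident_totals_py (incidents : List (List (String × String))) (out : List (String × Int)) : Prop := out = build_incident_totals_py_alt incidents
instance (incidents : List (List (String × String))) (out : List (String × Int)) : Decidable (Spec_build_incident_totals_py incidents out) := by unfold Spec_build_incident_totals_py; infer_instance

-- ===== CLAIM (what is proved, stated in full; the proofs are below) =====
def Claim_equal_build_incident_totals_py : Prop := ∀ (incidents : List (List (String × String))), Dom_build_incident_totals_py incidents → Pre_build_incident_totals_py incidents → Spec_build_incident_totals_py incidents (build_incident_totals_py incidents)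

-- ===== LEMMAS AND PROOFS =====

def pvKEYS : List String := ["total","open","acked","silenced","resolved","good","warn","bad","sla_breached"]

def pvContrib (k : String) (item : List (String × String)) : Int :=
  (if pvNorm item "status" = k then 1 else 0) +
  (if (k = "good" ∨ k = "warn" ∨ k = "bad") ∧ pvNorm item "severity" = k then 1 else 0) +
  (if k = "sla_breached" ∧ pvTruthy item then 1 else 0)

lemma keys_modify_mem (e : PySem.Dict String Int) (he : e.keys = pvKEYS) (k : String)
    (hk : k ∈ pvKEYS) : (e.modify k 0 (· + 1)).keys = pvKEYS := by
  rw [PySem.Dict.keys_modify, PySem.Dict.keys_insert_of_contains]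
  · exact he
  · rw [PySem.Dict.contains_iff_mem_keys, he]; exact hk

lemma keys_stepA (d : PySem.Dict String Int) (hd : d.keys = pvKEYS) (item : List (String × String)) :
    (pvStepA d item).keys = pvKEYS := by
  unfold pvStepA
  have hA : (if d.contains (pvNorm item "status") then d.modify (pvNorm item "status") 0 (· + 1) else d).keys = pvKEYS := by
    split_ifs with hc
    · exact keys_modify_mem d hd _ (by rwa [PySem.Dict.contains_iff_mem_keys, hd] at hc)
    · exact hd
  set d1 := (if d.contains (pvNorm item "status") then d.modify (pvNorm item "status") 0 (· + 1) else d) with hd1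
  have hB : (if pvNorm item "severity" = "good" ∨ pvNorm item "severity" = "warn" ∨ pvNorm item "severity" = "bad" then d1.modify (pvNorm item "severity") 0 (· + 1) else d1).keys = pvKEYS := by
    split_ifs with hx
    · exact keys_modify_mem d1 hA _ (by rcases hx with h|h|h <;> simp [h, pvKEYS])
    · exact hA
  set d2 := (if pvNorm item "severity" = "good" ∨ pvNorm item "severity" = "warn" ∨ pvNorm item "severity" = "bad" then d1.modify (pvNorm item "severity") 0 (· + 1) else d1) with hd2
  split_ifs with ht
  · exact keys_modify_mem d2 hB _ (by simp [pvKEYS])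
  · exact hB

lemma getD_stepA (d : PySem.Dict String Int) (hd : d.keys = pvKEYS) (item : List (String × String))
    (k : String) (hk : k ∈ pvKEYS) :
    (pvStepA d item).getD k 0 = d.getD k 0 + pvContrib k item := by
  unfold pvStepA pvContrib
  set sv := pvNorm item "status" with hsv
  set xv := pvNorm item "severity" with hxv
  set d1 := (if d.contains sv then d.modify sv 0 (· + 1) else d) with hd1
  set d2 := (if xv = "good" ∨ xv = "warn" ∨ xv = "bad" then d1.modify xv 0 (· + 1) else d1) with hd2
  have h1 : d1.getD k 0 = d.getD k 0 + (if sv = k then 1 else 0) := by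
    rw [hd1]; by_cases hc : d.contains sv
    · simp only [if_pos hc]; rw [PySem.Dict.getD_modify]
      by_cases he : k = sv
      · subst he; simp
      · have hn : ¬ sv = k := fun h => he h.symm
        simp [he, hn]
    · simp only [if_neg hc]
      have hne : ¬ sv = k := fun h => hc (by rw [PySem.Dict.contains_iff_mem_keys, hd]; exact h ▸ hk)
      simp [hne]
  have h2 : d2.getD k 0 = d1.getD k 0 + (if (k = "good" ∨ k = "warn" ∨ k = "bad") ∧ xv = k then 1 else 0) := by
    rw [hd2]; by_cases hx : xv = "good" ∨ xv = "warn" ∨ xv = "bad"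
    · simp only [if_pos hx]; rw [PySem.Dict.getD_modify]
      by_cases he : k = xv
      · subst he; simp [hx]
      · have hn : ¬((k = "good" ∨ k = "warn" ∨ k = "bad") ∧ xv = k) := fun h => he h.2.symm
        simp [he, hn]
    · simp only [if_neg hx]
      have hn : ¬((k = "good" ∨ k = "warn" ∨ k = "bad") ∧ xv = k) := by
        rintro ⟨h1', h2'⟩; subst h2'; exact hx h1'
      simp [hn]
  have h3 : (if pvTruthy item then d2.modify "sla_breached" 0 (· + 1) else d2).getD k 0
      = d2.getD k 0 + (if k = "sla_breached" ∧ pvTruthy item then 1 else 0) := by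
    by_cases ht : pvTruthy item
    · simp only [if_pos ht]; rw [PySem.Dict.getD_modify]
      by_cases he : k = "sla_breached"
      · simp [he, ht]
      · simp [he]
    · simp [ht]
  rw [h3, h2, h1]; ring

lemma getD_foldA (l : List (List (String × String))) (d : PySem.Dict String Int)
    (hd : d.keys = pvKEYS) (k : String) (hk : k ∈ pvKEYS) :
    (l.foldl pvStepA d).getD k 0 = d.getD k 0 + (l.map (pvContrib k)).sum := by
  induction l generalizing d with
  | nil => simp
  | cons x xs ih =>
    simp only [List.foldl_cons, List.map_cons, List.sum_cons]
    rw [ih _ (keys_stepA d hd x), getD_stepA d hd x k hk]; ring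

lemma keys_foldA (l : List (List (String × String))) (d : PySem.Dict String Int)
    (hd : d.keys = pvKEYS) : (l.foldl pvStepA d).keys = pvKEYS := by
  induction l generalizing d with
  | nil => exact hd
  | cons x xs ih => exact ih _ (keys_stepA d hd x)

lemma sum_ite_eq_count {α : Type} (f : α → String) (l : List α) (k : String) :
    (l.map (fun x => if f x = k then (1:Int) else 0)).sum = ((l.map f).count k : Int) := by
  induction l with
  | nil => simp
  | cons a l ih =>
    simp only [List.map_cons, List.sum_cons, List.count_cons, ih]
    by_cases h : f a = k
    · simp [h]; ring
    · simp [h]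

lemma sum_contrib (k : String) (l : List (List (String × String))) :
    (l.map (pvContrib k)).sum
      = ((l.map (fun it => pvNorm it "status")).count k : Int)
        + (if k = "good" ∨ k = "warn" ∨ k = "bad" then ((l.map (fun it => pvNorm it "severity")).count k : Int) else 0)
        + (if k = "sla_breached" then (l.countP pvTruthy : Int) else 0) := by
  rw [show l.map (pvContrib k) = l.map (fun item =>
      ((if pvNorm item "status" = k then (1:Int) else 0) +
        (if (k = "good" ∨ k = "warn" ∨ k = "bad") ∧ pvNorm item "severity" = k then 1 else 0)) +
      (if k = "sla_breached" ∧ pvTruthy item then 1 else 0)) from rfl]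
  rw [PySem.List.sum_map_add_int, PySem.List.sum_map_add_int, sum_ite_eq_count]
  have h2 : (l.map (fun item => if (k = "good" ∨ k = "warn" ∨ k = "bad") ∧ pvNorm item "severity" = k then (1:Int) else 0)).sum
      = (if k = "good" ∨ k = "warn" ∨ k = "bad" then ((l.map (fun it => pvNorm it "severity")).count k : Int) else 0) := by
    by_cases h4 : k = "good" ∨ k = "warn" ∨ k = "bad"
    · simp only [h4, true_and]
      exact sum_ite_eq_count (fun it => pvNorm it "severity") l k
    · simp [h4]
  have h3 : (l.map (fun item => if k = "sla_breached" ∧ pvTruthy item then (1:Int) else 0)).sum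
      = (if k = "sla_breached" then (l.countP pvTruthy : Int) else 0) := by
    by_cases h5 : k = "sla_breached"
    · simp only [h5, true_and]
      exact PySem.List.sum_map_ite_one_zero pvTruthy l
    · simp [h5]
  rw [h2, h3]

lemma main_eq (incidents : List (List (String × String)))
    (hP : Pre_build_incident_totals_py incidents) :
    build_incident_totals_py incidents = build_incident_totals_py_alt incidents := by
  have hzero : ∀ k ∈ (["total","good","warn","bad","sla_breached"] : List String),
      (incidents.map (fun it => pvNorm it "status")).count k = 0 := by
    intro k hk
    rw [List.count_eq_zero]
    intro hmem
    rcases List.mem_map.mp hmem with ⟨it, hit, hke⟩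
    unfold Pre_build_incident_totals_py at hP
    have hq := List.any_eq_false.mp hP it hit
    simp only [pvQuirkStatus, Bool.or_eq_true, beq_iff_eq, not_or] at hq
    fin_cases hk <;> simp_all
  simp only [build_incident_totals_py, build_incident_totals_py_alt]
  have hkeys : (PySem.Dict.ofList [("total", PySem.List.len incidents), ("open", (0:Int)), ("acked", 0),
      ("silenced", 0), ("resolved", 0), ("good", 0), ("warn", 0), ("bad", 0),
      ("sla_breached", 0)]).keys = pvKEYS := by
    simp [PySem.Dict.ofList, PySem.Dict.update, PySem.Dict.insert, PySem.Dict.contains,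
      PySem.Dict.empty, PySem.Dict.keys, pvKEYS]
  have hnd : pvKEYS.Nodup := by decide
  rw [PySem.Dict.items_eq_map_keys _ (by rw [keys_foldA _ _ hkeys]; exact hnd) 0,
    keys_foldA _ _ hkeys]
  have hval : ∀ k ∈ pvKEYS, (incidents.foldl pvStepA _).getD k 0
      = (PySem.Dict.ofList [("total", PySem.List.len incidents), ("open", (0:Int)), ("acked", 0),
          ("silenced", 0), ("resolved", 0), ("good", 0), ("warn", 0), ("bad", 0),
          ("sla_breached", 0)]).getD k 0 + (incidents.map (pvContrib k)).sum :=
    fun k hk => getD_foldA incidents _ hkeys k hk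
  simp only [pvKEYS, List.map_cons, List.map_nil]
  refine List.ext_getElem (by simp) ?_
  intro i h1 h2
  simp only [List.length_cons, List.length_nil] at h1 h2
  interval_cases i <;>
    simp only [List.getElem_cons_zero, List.getElem_cons_succ] <;>
    rw [hval _ (by decide), sum_contrib] <;>
    simp [PySem.Dict.ofList, PySem.Dict.update, PySem.Dict.insert, PySem.Dict.contains,
      PySem.Dict.empty, PySem.Dict.getD, PySem.Dict.get?,
      hzero "total" (by decide), hzero "good" (by decide), hzero "warn" (by decide),
      hzero "bad" (by decide), hzero "sla_breached" (by decide)]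

-- ===== VERDICT (by name: the statement is the Claim_ definition above) =====
theorem build_incident_totals_py_spec : Claim_equal_build_incident_totals_py := by
  intro incidents _ hP
  exact main_eq incidents hP
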